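-- pv_equiv track=rewrite | github.com/thaleshsantos/APC | lista3/ex40.py | chinelo
-- ===== SOURCE A (Python) =====
-- def chinelo(pe_do_bill, l):
--
--     l.sort()
--     i = 0
--     while ((i < len(l)) and (l[i] < pe_do_bill)):
--         i += 1
--     if(i == len(l)):
--         return -1
--     else:
--         return i
-- ===== SOURCE B (Python) =====
-- def chinelo(pe_do_bill, l):
--     # The index of the first element >= pe_do_bill in the sorted list is just
--     # the number of elements < pe_do_bill: no sort needed for the return value.
--     # (Unlike A, this does not sort l in place; the claim is about the return value.)
--     c = sum(1 for v in l if v < pe_do_bill)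
--     return -1 if c == len(l) else c
-- ===== Notes on version B (the rewrite author's own statement) =====
-- stated objective: faster
-- what changed: Drops the sort entirely: the index of the first element >= threshold in the sorted list equals the count of elements below the threshold, computed in one pass (B does not mutate l, unlike A's in-place sort).
import Mathlib
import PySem

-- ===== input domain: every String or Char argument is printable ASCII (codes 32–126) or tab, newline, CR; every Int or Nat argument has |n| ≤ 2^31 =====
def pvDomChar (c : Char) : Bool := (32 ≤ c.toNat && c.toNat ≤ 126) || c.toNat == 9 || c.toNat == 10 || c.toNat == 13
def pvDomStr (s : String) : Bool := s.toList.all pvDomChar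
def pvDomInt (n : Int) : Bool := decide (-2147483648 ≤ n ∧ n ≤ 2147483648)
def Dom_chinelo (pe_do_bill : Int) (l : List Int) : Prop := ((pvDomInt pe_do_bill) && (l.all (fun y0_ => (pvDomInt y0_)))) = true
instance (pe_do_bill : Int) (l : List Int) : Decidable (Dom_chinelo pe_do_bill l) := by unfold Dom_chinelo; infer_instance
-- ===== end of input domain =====

-- B drops the sort entirely: the sought index equals the count of elements below
-- the threshold, computed in one pass (return value only: A sorts l in place, B does not).


-- ===== PORT A =====
-- the while loop: while i < len(s) and s[i] < x: i += 1   (index always in range when read)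
def chineloScan (s : List Int) (x : Int) (i : Nat) : Nat :=
  if h : i < s.length ∧ PySem.List.pyGetD s (i : Int) 0 < x then
    chineloScan s x (i + 1)
  else i
termination_by s.length - i
decreasing_by omega

def chinelo (pe_do_bill : Int) (l : List Int) : Int :=
  let s := PySem.List.sorted l (fun v => v) false
  let i := chineloScan s pe_do_bill 0
  if i = s.length then -1 else (i : Int)

-- ===== PORT B =====
-- c = sum(1 for v in l if v < pe_do_bill): a fold over l with an Int accumulator
def chinelo_alt (pe_do_bill : Int) (l : List Int) : Int :=
  let c := l.foldl (fun acc v => if v < pe_do_bill then acc + 1 else acc) (0 : Int)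
  if c = (l.length : Int) then -1 else c

-- ===== PRECONDITION & SPEC =====
def Spec_chinelo (pe_do_bill : Int) (l : List Int) (out : Int) : Prop := out = chinelo_alt pe_do_bill l
instance (pe_do_bill : Int) (l : List Int) (out : Int) : Decidable (Spec_chinelo pe_do_bill l out) := by unfold Spec_chinelo; infer_instance

-- ===== CLAIM =====
def Claim_equal_chinelo : Prop := ∀ (pe_do_bill : Int) (l : List Int), Dom_chinelo pe_do_bill l → Spec_chinelo pe_do_bill l (chinelo pe_do_bill l)

-- ===== LEMMAS AND PROOFS =====

-- characterisation of A's scan result: the insertion point of x in the sorted s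
def InsPt (s : List Int) (x : Int) (k : Nat) : Prop :=
  k ≤ s.length ∧ (∀ j (hj : j < s.length), j < k → s[j] < x) ∧
    (∀ j (hj : j < s.length), k ≤ j → ¬ s[j] < x)

lemma chineloScan_insPt (s : List Int) (x : Int)
    (hs : s.Pairwise (fun a b => a ≤ b)) :
    ∀ i, i ≤ s.length → (∀ j (hj : j < s.length), j < i → s[j] < x) →
      InsPt s x (chineloScan s x i) := by
  intro i
  induction i using chineloScan.induct s x with
  | case1 i h ih =>
    intro hi hpref
    rw [chineloScan, dif_pos h]
    refine ih (by omega) ?_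
    intro j hj hji
    rcases Nat.lt_or_ge j i with hj' | hj'
    · exact hpref j hj hj'
    · have hji' : j = i := by omega
      subst hji'
      have := h.2
      rwa [PySem.List.pyGetD_natCast, List.getD_eq_getElem s 0 hj] at this
  | case2 i h =>
    intro hi hpref
    rw [chineloScan, dif_neg h]
    refine ⟨hi, hpref, ?_⟩
    intro j hj hji hlt
    rcases Nat.lt_or_ge i s.length with hil | hil
    · have hnot : ¬ PySem.List.pyGetD s (i : Int) 0 < x := by
        intro hc; exact h ⟨hil, hc⟩
      rw [PySem.List.pyGetD_natCast, List.getD_eq_getElem s 0 hil] at hnot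
      have hle : s[i] ≤ s[j] := by
        rcases Nat.eq_or_lt_of_le hji with rfl | hij
        · exact le_refl _
        · exact (List.pairwise_iff_getElem.mp hs) i j hil hj hij
      exact hnot (lt_of_le_of_lt hle hlt)
    · omega

-- an insertion point is exactly the count of elements below x
lemma insPt_eq_countP {s : List Int} {x : Int} {k : Nat} (h : InsPt s x k) :
    k = s.countP (fun v => decide (v < x)) := by
  obtain ⟨hk, hlt, hge⟩ := h
  have hsplit : s = s.take k ++ s.drop k := (List.take_append_drop k s).symm
  have h1 : (s.take k).countP (fun v => decide (v < x)) = (s.take k).length := by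
    apply List.countP_eq_length.mpr
    intro a ha
    obtain ⟨j, hj, rfl⟩ := List.mem_iff_getElem.mp ha
    have hjk : j < k := by
      have := hj; simp [List.length_take] at this; omega
    have hjs : j < s.length := by omega
    have : (s.take k)[j] = s[j] := List.getElem_take
    rw [this]
    simpa using hlt j hjs hjk
  have h2 : (s.drop k).countP (fun v => decide (v < x)) = 0 := by
    apply List.countP_eq_zero.mpr
    intro a ha
    obtain ⟨j, hj, rfl⟩ := List.mem_iff_getElem.mp ha
    have hjs : k + j < s.length := by
      have := hj; simp [List.length_drop] at this; omega
    have : (s.drop k)[j] = s[k + j] := by simp [List.getElem_drop]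
    rw [this]
    simpa using hge (k + j) hjs (by omega)
  calc k = (s.take k).length := by simp [List.length_take]; omega
    _ = (s.take k).countP (fun v => decide (v < x)) := h1.symm
    _ = s.countP (fun v => decide (v < x)) := by
          conv_rhs => rw [hsplit]
          rw [List.countP_append, h2]
          omega

-- B's fold is the count of elements below x (as an Int)
lemma foldl_count (x : Int) (l : List Int) : ∀ (acc : Int),
    l.foldl (fun acc v => if v < x then acc + 1 else acc) acc
      = acc + (l.countP (fun v => decide (v < x)) : Int) := by
  induction l with
  | nil => intro acc; simp
  | cons a t ih =>
    intro acc
    by_cases h : a < x <;> simp [List.foldl_cons, h, ih]; ring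

lemma scan_eq_count (x : Int) (l : List Int) :
    chineloScan (PySem.List.sorted l (fun v => v) false) x 0
      = l.countP (fun v => decide (v < x)) := by
  have hp := chineloScan_insPt (PySem.List.sorted l (fun v => v) false) x
    (PySem.List.sorted_pairwise l (fun v => v)) 0 (by omega) (by omega)
  rw [insPt_eq_countP hp]
  exact (PySem.List.sorted_perm l (fun v => v) false).countP_eq _

-- ===== VERDICT =====
theorem chinelo_spec : Claim_equal_chinelo := by
  intro x l _
  simp only [Spec_chinelo, chinelo, chinelo_alt, scan_eq_count,
    PySem.List.length_sorted, foldl_count]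
  have hc : (l.countP (fun v => decide (v < x)) : Int) = ((0 : Int) + l.countP (fun v => decide (v < x))) := by ring
  rcases eq_or_ne (l.countP (fun v => decide (v < x))) l.length with h | h
  · simp [h]
  · rw [if_neg h, if_neg (by omega : ¬ (0 : Int) + (l.countP (fun v => decide (v < x)) : Int) = (l.length : Int))]
    omega
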